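-- pv_equiv track=rewrite | github.com/JanKaczmarski/university | asd/code/kol3/kol3.py | orchard
-- ===== SOURCE A (Python) =====
-- def orchard(T, m):
--     n = len(T)
--     # False - can't solve
--     # True - can solve
--     # None - hasn't been computed yet
--     dp = [[[None for _ in range(m)] for __ in range(n)] for _ in range(n)]
--     # border values for dp[0]
--     dp[0][0][0] = True
--     for i in range(n):
--         for j in range(m):
--             if i == 0 and j != 0:
--                 dp[0][i][j] = False
--             elif i > 0:
--                 if T[0] == j: dp[0][i][j] = True
--                 elif T[0] != j: dp[0][i][j] = False
--
--     def f(i, k, mod):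
--         # edge case, we can't chop < 0 trees
--         if k < 0:
--             return None
--
--
--         # if value is already computed True or False
--         if dp[i][k][mod] is not None:
--             return dp[i][k][mod]
--
--         # we chop the i-th tree or not
--         tmp = mod
--         mod = (mod + T[i]) % m
--         dp[i][k][tmp] = f(i - 1, k, mod) or f(i - 1, k - 1, tmp)
--
--         return dp[i][k][tmp]
--
--     # special case
--     res = f(n-1, 0, 0)
--     if res: return 0
--
--     # read the solution
--     for k in range(1, n):
--         res = f(n-1, k, 0)
--         if res:
--             return k + 1
-- ===== SOURCE B (Python) =====
-- def orchard(T, m):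
--     # One-dimensional min-chop DP over residues: c[mod] = fewest chops k such that
--     # A's recurrence b(i,k,mod) holds, saturated at n; O(n*m) instead of A's O(n^2*m).
--     n = len(T)
--     c = [0 if mod == 0 else (1 if T[0] == mod else n) for mod in range(m)]
--     for t in T[1:]:
--         c = [min(c[(mod + t) % m], c[mod] + 1) for mod in range(m)]
--     k = c[0]
--     if k == 0:
--         return 0
--     if k <= n - 1:
--         return k + 1
--     return None
-- ===== Notes on version B (the rewrite author's own statement) =====
-- stated objective: faster
-- what changed: A's memoized 3-D boolean recursion over (tree, chops, residue) is replaced by a one-dimensional DP that keeps, per residue, the minimum number of chops (saturated at n) and updates it in a single pass over the trees.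
import Mathlib
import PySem

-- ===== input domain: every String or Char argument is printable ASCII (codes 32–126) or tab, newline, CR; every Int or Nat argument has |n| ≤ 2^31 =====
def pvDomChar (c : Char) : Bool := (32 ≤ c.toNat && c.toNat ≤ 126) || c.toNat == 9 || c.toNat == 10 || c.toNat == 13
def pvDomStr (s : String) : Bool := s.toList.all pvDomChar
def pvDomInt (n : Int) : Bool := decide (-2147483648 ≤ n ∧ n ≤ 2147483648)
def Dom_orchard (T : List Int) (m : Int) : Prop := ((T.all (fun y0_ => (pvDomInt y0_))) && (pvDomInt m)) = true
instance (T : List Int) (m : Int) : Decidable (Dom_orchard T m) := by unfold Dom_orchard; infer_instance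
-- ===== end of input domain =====

-- B replaces A's memoized 3-D boolean recursion by a one-pass min-chops DP over residues
-- (O(n*m) instead of O(n^2*m)); equality of the returned value is proved on Pre_ below.

-- ===== PORT A =====
-- A's 3-D array dp is ported as a total function Nat → Nat → Nat → Option Bool
-- (none = Python None); updates are pointwise function updates.
def orchardMemoUpd (dp : Nat → Nat → Nat → Option Bool) (i k j : Nat) (v : Option Bool) :
    Nat → Nat → Nat → Option Bool :=
  fun i' k' j' => if i' = i ∧ k' = k ∧ j' = j then v else dp i' k' j'

-- dp after the initialisation loops: dp[0][0][0]=True, row 0 filled (k=0: j==0, k>0: T[0]==j),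
-- all other rows None.
def orchardDpInit (T : List Int) : Nat → Nat → Nat → Option Bool :=
  fun i k j =>
    if i = 0 then
      if k = 0 then some (decide ((j : Int) = 0))
      else some (decide (T.getD 0 0 = (j : Int)))
    else none

-- the inner memoized recursion f(i, k, mod), threading the memo table
def orchardF (T : List Int) (m : Int) :
    Nat → (Nat → Nat → Nat → Option Bool) → Int → Int →
    Option Bool × (Nat → Nat → Nat → Option Bool)
  | i, dp, k, md =>
    if k < 0 then (none, dp)
    else
      match dp i k.toNat md.toNat with
      | some v => (some v, dp)
      | none =>
        match i with
        | 0 => (none, dp)   -- unreachable: row 0 of dp is fully initialised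
        | i' + 1 =>
          -- tmp = mod; mod = (mod + T[i]) % m; dp[i][k][tmp] = f(i-1,k,mod) or f(i-1,k-1,tmp)
          let q1 := orchardF T m i' dp k (PySem.Int.mod (md + T.getD (i' + 1) 0) m)
          if q1.1 = some true then
            (some true, orchardMemoUpd q1.2 (i' + 1) k.toNat md.toNat (some true))
          else
            let q2 := orchardF T m i' q1.2 (k - 1) md
            (q2.1, orchardMemoUpd q2.2 (i' + 1) k.toNat md.toNat q2.1)
  termination_by i _ _ _ => i

-- the final loop 'for k in range(1, n): res = f(n-1, k, 0); if res: return k + 1'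
def orchardScan (T : List Int) (m : Int) (nn : Nat)
    (dp : Nat → Nat → Nat → Option Bool) : List Nat → Option Int
  | [] => none
  | k :: ks =>
    let q := orchardF T m nn dp (k : Int) 0
    if q.1 = some true then some ((k : Int) + 1) else orchardScan T m nn q.2 ks

def orchard (T : List Int) (m : Int) : Option Int :=
  let n := T.length
  let dp := orchardDpInit T
  let q := orchardF T m (n - 1) dp 0 0
  if q.1 = some true then some 0
  else orchardScan T m (n - 1) q.2 (List.range' 1 (n - 1))

-- ===== PORT B =====
-- Source B: c[mod] = fewest chops (saturated at n) so that A's recurrence holds; one pass over T[1:].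
def orchard_alt (T : List Int) (m : Int) : Option Int :=
  let n := T.length
  let c0 := (List.range m.toNat).map (fun (md : Nat) =>
    if (md : Int) = 0 then 0 else if T.getD 0 0 = (md : Int) then 1 else (n : Int))
  let c := (T.drop 1).foldl
    (fun c t => (List.range m.toNat).map (fun (md : Nat) =>
      min (c.getD (PySem.Int.mod ((md : Int) + t) m).toNat 0) (c.getD md 0 + 1))) c0
  let k := c.getD 0 0
  if k = 0 then some 0
  else if k ≤ (n : Int) - 1 then some (k + 1)
  else none

-- ===== PRECONDITION & SPEC =====
-- Pre_ excludes exactly the inputs where Python A raises: T = [] or m ≤ 0 (IndexError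
-- building/reading the dp table).
def Pre_orchard (T : List Int) (m : Int) : Prop := T ≠ [] ∧ 1 ≤ m
instance (T : List Int) (m : Int) : Decidable (Pre_orchard T m) := by unfold Pre_orchard; infer_instance

def pvWitness_orchard : List Int × Int := ([3, 4, 5], 3)

def Spec_orchard (T : List Int) (m : Int) (out : Option Int) : Prop := out = orchard_alt T m
instance (T : List Int) (m : Int) (out : Option Int) : Decidable (Spec_orchard T m out) := by unfold Spec_orchard; infer_instance

-- ===== CLAIM (what is proved, stated in full; the proofs are below) =====
def Claim_equal_orchard : Prop := ∀ (T : List Int) (m : Int), Dom_orchard T m → Pre_orchard T m → Spec_orchard T m (orchard T m)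

-- ===== LEMMAS AND PROOFS =====

-- pure (memo-free) value of A's recursion f(i,k,mod), as a Bool (truthiness)
def bSpec (T : List Int) (m : Int) : Nat → Int → Int → Bool
  | 0, k, md => if k < 0 then false else if k = 0 then decide (md = 0) else decide (T.getD 0 0 = md)
  | i + 1, k, md =>
    if k < 0 then false
    else bSpec T m i k (PySem.Int.mod (md + T.getD (i + 1) 0) m) || bSpec T m i (k - 1) md

-- pure value of B's DP cell c[mod] after processing T[1..i]
def cPure (T : List Int) (m : Int) : Nat → Int → Int
  | 0, md => if md = 0 then 0 else if T.getD 0 0 = md then 1 else (T.length : Int)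
  | i + 1, md => min (cPure T m i (PySem.Int.mod (md + T.getD (i + 1) 0) m)) (cPure T m i md + 1)

-- memo-table invariant: row 0 fully initialised with the pure values, every stored entry pure
def MemoOK (T : List Int) (m : Int) (dp : Nat → Nat → Nat → Option Bool) : Prop :=
  (∀ k j : Nat, dp 0 k j = some (bSpec T m 0 (k : Int) (j : Int))) ∧
  (∀ i k j : Nat, ∀ v, dp i k j = some v → v = bSpec T m i (k : Int) (j : Int))

lemma memoOK_init (T : List Int) (m : Int) : MemoOK T m (orchardDpInit T) := by
  constructor
  · intro k j
    have hk : ¬ ((k : Int) < 0) := by omega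
    have hk0 : ((k : Int) = 0) ↔ (k = 0) := by omega
    simp only [orchardDpInit, bSpec, if_neg hk, hk0]
    by_cases h : k = 0 <;> simp [h]
  · intro i k j v hv
    unfold orchardDpInit at hv
    by_cases hi : i = 0
    · subst hi
      have hk : ¬ ((k : Int) < 0) := by omega
      have hk0 : ((k : Int) = 0) ↔ (k = 0) := by omega
      simp only [bSpec, if_neg hk, hk0]
      by_cases h : k = 0 <;> simp [h] at hv ⊢ <;> exact hv.symm
    · simp [hi] at hv

lemma memoOK_upd (T : List Int) (m : Int) (dp : Nat → Nat → Nat → Option Bool)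
    (h : MemoOK T m dp) (i' k j : Nat) (v : Option Bool)
    (hv : ∀ b, v = some b → b = bSpec T m (i' + 1) (k : Int) (j : Int)) :
    MemoOK T m (orchardMemoUpd dp (i' + 1) k j v) := by
  constructor
  · intro k' j'
    have : ¬ (0 = i' + 1 ∧ k' = k ∧ j' = j) := by omega
    simp only [orchardMemoUpd, if_neg this]
    exact h.1 k' j'
  · intro i2 k' j' b hb
    unfold orchardMemoUpd at hb
    by_cases hc : i2 = i' + 1 ∧ k' = k ∧ j' = j
    · obtain ⟨h1, h2, h3⟩ := hc
      subst h1; subst h2; subst h3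
      rw [if_pos ⟨rfl, rfl, rfl⟩] at hb
      exact hv b hb
    · rw [if_neg hc] at hb
      exact h.2 i2 k' j' b hb

lemma orchardF_correct (T : List Int) (m : Int) (hm : 0 < m) :
    ∀ (i : Nat) (dp : Nat → Nat → Nat → Option Bool) (k md : Int), MemoOK T m dp → 0 ≤ md →
      (((orchardF T m i dp k md).1 = some true) ↔ bSpec T m i k md = true) ∧
      MemoOK T m (orchardF T m i dp k md).2 := by
  intro i
  induction i with
  | zero =>
    intro dp k md hdp hmd
    rw [orchardF]
    by_cases hk : k < 0
    · simp only [if_pos hk]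
      refine ⟨?_, hdp⟩
      simp [bSpec, hk]
    · have hkc : ((k.toNat : Int)) = k := Int.toNat_of_nonneg (by omega)
      have hmc : ((md.toNat : Int)) = md := Int.toNat_of_nonneg hmd
      have h0 := hdp.1 k.toNat md.toNat
      rw [hkc, hmc] at h0
      simp only [if_neg hk, h0]
      refine ⟨?_, hdp⟩
      cases hb : bSpec T m 0 k md
      · simp
      · simp
  | succ i' ih =>
    intro dp k md hdp hmd
    rw [orchardF]
    by_cases hk : k < 0
    · simp only [if_pos hk]
      refine ⟨?_, hdp⟩
      simp [bSpec, hk]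
    · have hkc : ((k.toNat : Int)) = k := Int.toNat_of_nonneg (by omega)
      have hmc : ((md.toNat : Int)) = md := Int.toNat_of_nonneg hmd
      simp only [if_neg hk]
      cases hmem : dp (i' + 1) k.toNat md.toNat with
      | some v =>
        have hvv := hdp.2 (i' + 1) k.toNat md.toNat v hmem
        rw [hkc, hmc] at hvv
        refine ⟨?_, hdp⟩
        subst hvv
        cases hb : bSpec T m (i' + 1) k md
        · simp
        · simp
      | none =>
        have hmd2 : 0 ≤ PySem.Int.mod (md + T.getD (i' + 1) 0) m :=
          PySem.Int.mod_nonneg _ hm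
        obtain ⟨hiff1, hok1⟩ :=
          ih dp k (PySem.Int.mod (md + T.getD (i' + 1) 0) m) hdp hmd2
        by_cases h1 : (orchardF T m i' dp k (PySem.Int.mod (md + T.getD (i' + 1) 0) m)).1 = some true
        · have hb1 : bSpec T m i' k (PySem.Int.mod (md + T.getD (i' + 1) 0) m) = true := hiff1.mp h1
          have hbs : bSpec T m (i' + 1) k md = true := by
            simp only [bSpec, if_neg hk, hb1, Bool.true_or]
          simp only [if_pos h1]
          refine ⟨by simp [hbs], ?_⟩
          apply memoOK_upd T m _ hok1
          intro b hb
          rw [hkc, hmc, hbs]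
          cases hb
          rfl
        · have hb1 : bSpec T m i' k (PySem.Int.mod (md + T.getD (i' + 1) 0) m) = false := by
            cases hb : bSpec T m i' k (PySem.Int.mod (md + T.getD (i' + 1) 0) m)
            · rfl
            · exact absurd (hiff1.mpr hb) h1
          obtain ⟨hiff2, hok2⟩ :=
            ih (orchardF T m i' dp k (PySem.Int.mod (md + T.getD (i' + 1) 0) m)).2 (k - 1) md hok1 hmd
          have hbs : bSpec T m (i' + 1) k md = bSpec T m i' (k - 1) md := by
            simp only [bSpec, if_neg hk, hb1, Bool.false_or]
          simp only [if_neg h1]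
          refine ⟨by rw [hbs]; exact hiff2, ?_⟩
          apply memoOK_upd T m _ hok2
          intro b hb
          rw [hkc, hmc, hbs]
          cases b
          · cases hb2 : bSpec T m i' (k - 1) md
            · rfl
            · exact absurd (hiff2.mpr hb2) (by rw [hb]; simp)
          · exact (hiff2.mp hb).symm

lemma orchardScan_eq (T : List Int) (m : Int) (hm : 0 < m) (nn : Nat) :
    ∀ (ks : List Nat) (dp : Nat → Nat → Nat → Option Bool), MemoOK T m dp →
      orchardScan T m nn dp ks =
        (match ks.find? (fun k : Nat => bSpec T m nn (k : Int) 0) with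
         | some k => some ((k : Int) + 1)
         | none => none) := by
  intro ks
  induction ks with
  | nil => intro dp _; rfl
  | cons k ks ihs =>
    intro dp hdp
    obtain ⟨hiff, hok⟩ := orchardF_correct T m hm nn dp (k : Int) 0 hdp le_rfl
    rw [orchardScan]
    by_cases h1 : (orchardF T m nn dp (k : Int) 0).1 = some true
    · have hb : bSpec T m nn (k : Int) 0 = true := hiff.mp h1
      simp only [if_pos h1, List.find?, hb]
    · have hb : bSpec T m nn (k : Int) 0 = false := by
        cases hbb : bSpec T m nn (k : Int) 0
        · rfl
        · exact absurd (hiff.mpr hbb) h1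
      simp only [if_neg h1, List.find?, hb]
      exact ihs _ hok

lemma cPure_nonneg (T : List Int) (m : Int) : ∀ (i : Nat) (md : Int), 0 ≤ cPure T m i md := by
  intro i
  induction i with
  | zero =>
    intro md
    simp only [cPure]
    split
    · omega
    · split <;> omega
  | succ i' ih =>
    intro md
    simp only [cPure, le_min_iff]
    exact ⟨ih _, by have := ih md; omega⟩

lemma bSpec_le_cPure (T : List Int) (m : Int) :
    ∀ (i : Nat) (k md : Int), bSpec T m i k md = true → cPure T m i md ≤ k := by
  intro i
  induction i with
  | zero =>
    intro k md hb
    simp only [bSpec] at hb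
    simp only [cPure]
    by_cases h0 : md = 0
    · rw [if_pos h0]
      by_cases hk : k < 0
      · simp [hk] at hb
      · omega
    · rw [if_neg h0]
      by_cases hk : k < 0
      · simp [hk] at hb
      · rw [if_neg hk] at hb
        by_cases hk0 : k = 0
        · rw [if_pos hk0] at hb
          simp only [decide_eq_true_eq] at hb
          exact absurd hb h0
        · rw [if_neg hk0] at hb
          simp only [decide_eq_true_eq] at hb
          rw [if_pos hb]
          omega
  | succ i' ih =>
    intro k md hb
    simp only [bSpec] at hb
    by_cases hk : k < 0
    · simp [hk] at hb
    · rw [if_neg hk, Bool.or_eq_true] at hb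
      simp only [cPure]
      rcases hb with hb | hb
      · have := ih k _ hb
        omega
      · have := ih (k - 1) md hb
        omega

lemma cPure_bSpec (T : List Int) (m : Int) :
    ∀ (i : Nat) (md : Int), cPure T m i md < (T.length : Int) →
      bSpec T m i (cPure T m i md) md = true := by
  intro i
  induction i with
  | zero =>
    intro md hlt
    by_cases h0 : md = 0
    · have hc : cPure T m 0 md = 0 := by simp [cPure, h0]
      rw [hc]
      simp [bSpec, h0]
    · by_cases h1 : T.getD 0 0 = md
      · have hc : cPure T m 0 md = 1 := by
          simp only [cPure]; rw [if_neg h0, if_pos h1]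
        rw [hc]
        simp only [bSpec]
        norm_num
        simpa using h1
      · exfalso
        have hc : cPure T m 0 md = (T.length : Int) := by
          simp only [cPure]; rw [if_neg h0, if_neg h1]
        rw [hc] at hlt
        omega
  | succ i' ih =>
    intro md hlt
    simp only [cPure] at hlt ⊢
    have hk : ¬ (min (cPure T m i' (PySem.Int.mod (md + T.getD (i' + 1) 0) m)) (cPure T m i' md + 1) < 0) := by
      have h1 := cPure_nonneg T m i' (PySem.Int.mod (md + T.getD (i' + 1) 0) m)
      have h2 := cPure_nonneg T m i' md
      omega
    rw [bSpec, if_neg hk, Bool.or_eq_true]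
    rcases le_or_gt (cPure T m i' (PySem.Int.mod (md + T.getD (i' + 1) 0) m)) (cPure T m i' md + 1) with hle | hlt2
    · left
      rw [min_eq_left hle]
      exact ih _ (by omega)
    · right
      rw [min_eq_right (le_of_lt hlt2)]
      have : cPure T m i' md + 1 - 1 = cPure T m i' md := by ring
      rw [this]
      exact ih _ (by omega)

lemma find?_range'_eq_some (p : Nat → Bool) (a : Nat) :
    ∀ (c s : Nat), s ≤ a → a < s + c → p a = true → (∀ b, s ≤ b → b < a → p b = false) →
      List.find? p (List.range' s c) = some a := by
  intro c
  induction c with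
  | zero => intro s h1 h2; omega
  | succ c' ih =>
    intro s h1 h2 hp hmin
    rw [List.range'_succ]
    by_cases hs : s = a
    · subst hs
      simp [List.find?, hp]
    · have : p s = false := hmin s le_rfl (by omega)
      simp only [List.find?, this]
      exact ih (s + 1) (by omega) (by omega) hp (fun b hb1 hb2 => hmin b (by omega) hb2)

lemma getD_map_range_int (M : Nat) (g : Nat → Int) (j : Nat) (hj : j < M) :
    ((List.range M).map g).getD j 0 = g j := by
  rw [List.getD_eq_getElem?_getD, List.getElem?_map, List.getElem?_range hj]
  rfl

lemma rowFold (T : List Int) (m : Int) (hm : 0 < m) :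
    ∀ (j : Nat), j ≤ T.length - 1 →
      (((T.drop 1).take j).foldl
          (fun c t => (List.range m.toNat).map (fun (md : Nat) =>
            min (c.getD (PySem.Int.mod ((md : Int) + t) m).toNat 0) (c.getD md 0 + 1)))
          ((List.range m.toNat).map (fun (md : Nat) =>
            if (md : Int) = 0 then 0 else if T.getD 0 0 = (md : Int) then 1 else (T.length : Int)))) =
        (List.range m.toNat).map (fun (md : Nat) => cPure T m j (md : Int)) := by
  intro j
  induction j with
  | zero =>
    intro _
    simp only [List.take_zero, List.foldl_nil]
    apply List.map_congr_left
    intro md _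
    simp only [cPure]
  | succ j' ih =>
    intro hj
    have hj' : j' < (T.drop 1).length := by
      simp only [List.length_drop]
      omega
    rw [List.take_add_one, List.getElem?_eq_getElem hj', Option.toList_some, List.foldl_append,
      ih (by omega), List.foldl_cons, List.foldl_nil]
    apply List.map_congr_left
    intro md hmd
    have hmdM : md < m.toNat := List.mem_range.mp hmd
    have hmod_nonneg : 0 ≤ PySem.Int.mod ((md : Int) + (T.drop 1)[j']) m :=
      PySem.Int.mod_nonneg _ hm
    have hmod_lt : PySem.Int.mod ((md : Int) + (T.drop 1)[j']) m < m :=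
      PySem.Int.mod_lt _ hm
    have hidx : (PySem.Int.mod ((md : Int) + (T.drop 1)[j']) m).toNat < m.toNat := by omega
    rw [getD_map_range_int _ _ _ hidx, getD_map_range_int _ _ _ hmdM]
    have hcast : (((PySem.Int.mod ((md : Int) + (T.drop 1)[j']) m).toNat : Int)) =
        PySem.Int.mod ((md : Int) + (T.drop 1)[j']) m := Int.toNat_of_nonneg hmod_nonneg
    rw [hcast]
    have hget : (T.drop 1)[j'] = T.getD (j' + 1) 0 := by
      rw [List.getElem_drop, List.getD_eq_getElem?_getD,
        List.getElem?_eq_getElem (by omega : j' + 1 < T.length)]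
      simp only [Option.getD_some]
      congr 1
      omega
    rw [hget]
    simp only [cPure]

lemma orchard_alt_eq (T : List Int) (m : Int) (hm : 0 < m) :
    orchard_alt T m =
      (if cPure T m (T.length - 1) 0 = 0 then some 0
       else if cPure T m (T.length - 1) 0 ≤ (T.length : Int) - 1 then
         some (cPure T m (T.length - 1) 0 + 1)
       else none) := by
  have hlen : (T.drop 1).length = T.length - 1 := by simp
  have htake : (T.drop 1).take (T.length - 1) = T.drop 1 := by
    rw [← hlen]
    exact List.take_length
  have hfold := rowFold T m hm (T.length - 1) le_rfl
  rw [htake] at hfold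
  have hM : 0 < m.toNat := by omega
  simp only [orchard_alt]
  rw [hfold, getD_map_range_int _ _ 0 hM]
  simp only [Nat.cast_zero]

-- ===== VERDICT (by name: the statement is the Claim_ definition above) =====
theorem orchard_spec : Claim_equal_orchard := by
  intro T m _ hpre
  obtain ⟨hT, hm1⟩ := hpre
  have hm : 0 < m := hm1
  have hn : 0 < T.length := List.length_pos_iff.mpr hT
  unfold Spec_orchard
  obtain ⟨hiff0, hok0⟩ :=
    orchardF_correct T m hm (T.length - 1) (orchardDpInit T) 0 0 (memoOK_init T m) le_rfl
  have hscan := orchardScan_eq T m hm (T.length - 1) (List.range' 1 (T.length - 1)) _ hok0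
  have hMnn : 0 ≤ cPure T m (T.length - 1) 0 := cPure_nonneg T m _ _
  rw [orchard_alt_eq T m hm]
  simp only [orchard]
  by_cases hM0 : cPure T m (T.length - 1) 0 = 0
  · have hb0 : bSpec T m (T.length - 1) 0 0 = true := by
      have := cPure_bSpec T m (T.length - 1) 0 (by omega)
      rwa [hM0] at this
    rw [if_pos (hiff0.mpr hb0), if_pos hM0]
  · have hb0 : bSpec T m (T.length - 1) 0 0 = false := by
      cases hbb : bSpec T m (T.length - 1) 0 0
      · rfl
      · have := bSpec_le_cPure T m (T.length - 1) 0 0 hbb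
        omega
    have hq1 : ¬ ((orchardF T m (T.length - 1) (orchardDpInit T) 0 0).1 = some true) := by
      intro h
      rw [hiff0.mp h] at hb0
      exact absurd hb0 (by simp)
    rw [if_neg hq1, if_neg hM0, hscan]
    by_cases hMle : cPure T m (T.length - 1) 0 ≤ (T.length : Int) - 1
    · have hblt : cPure T m (T.length - 1) 0 < (T.length : Int) := by omega
      have hbM : bSpec T m (T.length - 1) (cPure T m (T.length - 1) 0) 0 = true :=
        cPure_bSpec T m (T.length - 1) 0 hblt
      have hcast : (((cPure T m (T.length - 1) 0).toNat : Int)) = cPure T m (T.length - 1) 0 :=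
        Int.toNat_of_nonneg hMnn
      have hfind : List.find? (fun k : Nat => bSpec T m (T.length - 1) (k : Int) 0)
          (List.range' 1 (T.length - 1)) = some (cPure T m (T.length - 1) 0).toNat := by
        apply find?_range'_eq_some
        · omega
        · omega
        · rw [hcast]; exact hbM
        · intro b hb1 hb2
          cases hbb : bSpec T m (T.length - 1) (b : Int) 0
          · rfl
          · have := bSpec_le_cPure T m (T.length - 1) (b : Int) 0 hbb
            omega
      rw [hfind]
      simp only [hcast, if_pos hMle]
    · have hfind : List.find? (fun k : Nat => bSpec T m (T.length - 1) (k : Int) 0)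
          (List.range' 1 (T.length - 1)) = none := by
        rw [List.find?_eq_none]
        intro b hb
        have hbb := List.mem_range'_1.mp hb
        simp only [Bool.not_eq_true]
        cases hbx : bSpec T m (T.length - 1) (b : Int) 0
        · rfl
        · have := bSpec_le_cPure T m (T.length - 1) (b : Int) 0 hbx
          omega
      rw [hfind, if_neg hMle]
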